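-- pv_equiv track=rewrite | github.com/thanhhtann-hi/tn-da21ttb-duongthanhtan-chatbotcongvan-litestar | src/modules/memory/service/memory.py | _remove_by_indices
-- ===== SOURCE A (Python) =====
-- from typing import Optional, Tuple, List
--
-- def _remove_by_indices(lines: List[str], indices_desc_newest: List[int]) -> Tuple[List[str], int]:
--     """
--     indices_desc_newest: danh sách chỉ số 1-based từ MỚI → CŨ (#1 là dòng cuối list).
--     """
--     if not lines:
--         return lines, 0
--     N = len(lines)
--     to_remove_pos = set()
--     for idx_newest in indices_desc_newest:
--         pos = N - idx_newest
--         if 0 <= pos < N: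
--             to_remove_pos.add(pos)
--     keep = [ln for i, ln in enumerate(lines) if i not in to_remove_pos]
--     removed_count = N - len(keep)
--     return keep, removed_count
-- ===== SOURCE B (Python) =====
-- from typing import Tuple, List
--
-- def _remove_by_indices(lines: List[str], indices_desc_newest: List[int]) -> Tuple[List[str], int]:
--     if not lines:
--         return lines, 0
--     N = len(lines)
--     result = list(lines)
--     positions = {N - i for i in indices_desc_newest if 0 <= N - i < N}
--     for pos in sorted(positions, reverse=True):
--         del result[pos]
--     return result, N - len(result)
-- ===== Notes on version B (the rewrite author's own statement) =====
-- stated objective: alternative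
-- what changed: Replaces A's build-a-removal-set-then-filter-by-enumerate pass with copying the list, sorting the valid positions descending, and deleting each in place.
import Mathlib
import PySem

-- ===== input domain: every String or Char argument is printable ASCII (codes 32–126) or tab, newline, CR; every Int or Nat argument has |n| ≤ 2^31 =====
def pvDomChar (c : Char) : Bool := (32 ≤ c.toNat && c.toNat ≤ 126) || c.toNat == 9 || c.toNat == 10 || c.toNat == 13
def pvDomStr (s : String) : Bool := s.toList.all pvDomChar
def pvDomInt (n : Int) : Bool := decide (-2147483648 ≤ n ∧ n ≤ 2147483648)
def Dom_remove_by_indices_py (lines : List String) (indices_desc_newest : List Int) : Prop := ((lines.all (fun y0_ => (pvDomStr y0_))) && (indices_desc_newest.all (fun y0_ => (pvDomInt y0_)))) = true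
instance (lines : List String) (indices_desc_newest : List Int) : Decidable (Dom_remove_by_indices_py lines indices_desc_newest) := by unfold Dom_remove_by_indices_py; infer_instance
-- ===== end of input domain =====

-- B replaces A's set-membership filter pass with sort-then-descending-in-place-deletion on a copy;
-- objective: alternative (same asymptotics in practice, different algorithmic decomposition).

-- ===== PORT A =====
def remove_by_indices_py (lines : List String) (indices_desc_newest : List Int) : List String × Int :=
  if lines = [] then (lines, 0)
  else
    let N : Int := (lines.length : Int)
    let toRemove : PySem.Set Int :=
      indices_desc_newest.foldl
        (fun s idx_newest =>
          let pos := N - idx_newest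
          if decide (0 ≤ pos) && decide (pos < N) then PySem.Set.add s pos else s)
        PySem.Set.empty
    let keep := ((PySem.List.enumerate lines 0).filter
        (fun q => !(PySem.Set.contains toRemove q.1))).map (fun q => q.2)
    (keep, N - (keep.length : Int))

-- ===== PORT B =====
def remove_by_indices_py_alt (lines : List String) (indices_desc_newest : List Int) : List String × Int :=
  if lines = [] then (lines, 0)
  else
    let N : Int := (lines.length : Int)
    let positions : PySem.Set Int :=
      PySem.Set.ofList ((indices_desc_newest.map (fun i => N - i)).filter
        (fun p => decide (0 ≤ p) && decide (p < N)))
    let result := (PySem.List.sorted positions (fun x => x) true).foldl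
        (fun l p => l.eraseIdx p.toNat) lines
    (result, N - (result.length : Int))

-- ===== PRECONDITION & SPEC =====
def Spec_remove_by_indices_py (lines : List String) (indices_desc_newest : List Int) (out : List String × Int) : Prop := out = remove_by_indices_py_alt lines indices_desc_newest
instance (lines : List String) (indices_desc_newest : List Int) (out : List String × Int) : Decidable (Spec_remove_by_indices_py lines indices_desc_newest out) := by unfold Spec_remove_by_indices_py; infer_instance

-- ===== CLAIM (what is proved, stated in full; the proofs are below) =====
def Claim_equal_remove_by_indices_py : Prop := ∀ (lines : List String) (indices_desc_newest : List Int), Dom_remove_by_indices_py lines indices_desc_newest → Spec_remove_by_indices_py lines indices_desc_newest (remove_by_indices_py lines indices_desc_newest)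

-- ===== LEMMAS AND PROOFS =====

-- A's guarded-add loop builds exactly set() of the filtered mapped list.
lemma foldl_guarded_add (idx : List Int) (N : Int) :
    ∀ (acc : PySem.Set Int),
      idx.foldl
        (fun s i =>
          let pos := N - i
          if decide (0 ≤ pos) && decide (pos < N) then PySem.Set.add s pos else s) acc
      = ((idx.map (fun i => N - i)).filter
          (fun p => decide (0 ≤ p) && decide (p < N))).foldl PySem.Set.add acc := by
  induction idx with
  | nil => intro acc; rfl
  | cons i tl ih =>
      intro acc
      simp only [List.foldl_cons, List.map_cons, List.filter_cons]
      by_cases h : (decide (0 ≤ N - i) && decide (N - i < N)) = true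
      · rw [if_pos h, if_pos h, ih, List.foldl_cons]
      · rw [if_neg h, if_neg h, ih]

-- Deleting strictly descending in-range positions = filtering out those indices.
lemma erase_desc_eq_filter :
    ∀ (ps : List Int) (xs : List String),
      ps.Pairwise (fun a b => b < a) →
      (∀ p ∈ ps, 0 ≤ p ∧ p < (xs.length : Int)) →
      ps.foldl (fun l p => l.eraseIdx p.toNat) xs
        = ((PySem.List.enumerate xs 0).filter (fun q => !(ps.contains q.1))).map (fun q => q.2) := by
  intro ps
  induction ps with
  | nil =>
      intro xs _ _
      simp [PySem.List.map_snd_enumerate]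
  | cons p rest ih =>
      intro xs hpw hb
      obtain ⟨hp0, hpN⟩ := hb p (by simp)
      set n : Nat := p.toNat with hn
      have hcast : (n : Int) = p := Int.toNat_of_nonneg hp0
      have hlt : n < xs.length := by omega
      have hrest_lt : ∀ r ∈ rest, r < p := by
        intro r hr; exact (List.pairwise_cons.mp hpw).1 r hr
      -- apply IH to the erased list
      have hlen_er : (xs.eraseIdx n).length = xs.length - 1 := by
        simp [List.length_eraseIdx, hlt]
      have hIH := ih (xs.eraseIdx n) (List.pairwise_cons.mp hpw).2
        (by
          intro r hr
          obtain ⟨hr0, _⟩ := hb r (by simp [hr])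
          have := hrest_lt r hr
          constructor
          · exact hr0
          · rw [hlen_er]; omega)
      simp only [List.foldl_cons]
      rw [hIH]
      -- decompose xs around position n
      have hdrop : xs.drop n = xs[n] :: xs.drop (n + 1) := List.drop_eq_getElem_cons hlt
      have hxs : xs = xs.take n ++ xs[n] :: xs.drop (n + 1) := by
        conv_lhs => rw [← List.take_append_drop n xs, hdrop]
      have her : xs.eraseIdx n = xs.take n ++ xs.drop (n + 1) :=
        List.eraseIdx_eq_take_drop_succ xs n
      have hlen_take : (xs.take n).length = n := by
        simp [List.length_take, Nat.le_of_lt hlt, Nat.min_eq_left (Nat.le_of_lt hlt)]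
      -- rewrite both sides
      rw [her]
      conv_rhs => rw [hxs]
      rw [PySem.List.enumerate_append, PySem.List.enumerate_append, hlen_take,
        PySem.List.enumerate_cons, List.filter_append, List.filter_append, List.map_append,
        List.map_append]
      simp only [zero_add]
      -- take part: predicates agree (indices < n = p)
      have htake : List.filter (fun q => !(rest.contains q.1)) (PySem.List.enumerate (xs.take n) 0)
          = List.filter (fun q => !((p :: rest).contains q.1)) (PySem.List.enumerate (xs.take n) 0) := by
        apply List.filter_congr
        intro q hq
        obtain ⟨k, hk, rfl⟩ := (PySem.List.mem_enumerate_iff _ _ _).mp hq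
        rw [hlen_take] at hk
        simp [List.contains_cons]
        exact fun _ h => by omega
      -- drop parts: predicates are vacuously true there
      have hdrop1 : List.filter (fun q => !(rest.contains q.1))
            (PySem.List.enumerate (xs.drop (n + 1)) ((n : Int)))
          = PySem.List.enumerate (xs.drop (n + 1)) ((n : Int)) := by
        apply List.filter_eq_self.mpr
        intro q hq
        obtain ⟨k, hk, rfl⟩ := (PySem.List.mem_enumerate_iff _ _ _).mp hq
        have : ((n : Int) + (k : Int)) ∉ rest := by
          intro hmem
          have := hrest_lt _ hmem
          omega
        simpa using this
      have hdrop2 : List.filter (fun q => !((p :: rest).contains q.1))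
            (PySem.List.enumerate (xs.drop (n + 1)) ((n : Int) + 1))
          = PySem.List.enumerate (xs.drop (n + 1)) ((n : Int) + 1) := by
        apply List.filter_eq_self.mpr
        intro q hq
        obtain ⟨k, hk, rfl⟩ := (PySem.List.mem_enumerate_iff _ _ _).mp hq
        have h1 : ((n : Int) + 1 + (k : Int)) ≠ p := by omega
        have h2 : ((n : Int) + 1 + (k : Int)) ∉ rest := by
          intro hmem
          have := hrest_lt _ hmem
          omega
        simp [List.contains_cons, h1, Ne.symm h1, h2]
      rw [htake, hdrop1]
      simp only [List.filter_cons]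
      rw [if_neg (by simp [hcast])]
      rw [hdrop2, PySem.List.map_snd_enumerate, PySem.List.map_snd_enumerate]

-- ===== VERDICT (by name: the statement is the Claim_ definition above) =====
theorem remove_by_indices_py_spec : Claim_equal_remove_by_indices_py := by
  intro lines idx _hdom
  unfold Spec_remove_by_indices_py remove_by_indices_py remove_by_indices_py_alt
  by_cases hl : lines = []
  · simp [hl]
  · simp only [if_neg hl]
    set N : Int := (lines.length : Int) with hN
    set L : List Int := ((idx.map (fun i => N - i)).filter
        (fun p => decide (0 ≤ p) && decide (p < N))) with hL
    have hset : idx.foldl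
        (fun s i =>
          let pos := N - i
          if decide (0 ≤ pos) && decide (pos < N) then PySem.Set.add s pos else s)
        PySem.Set.empty = PySem.Set.ofList L := by
      rw [foldl_guarded_add, PySem.Set.ofList_eq_foldl]; rfl
    set positions : PySem.Set Int := PySem.Set.ofList L with hpos
    set ps : List Int := PySem.List.sorted positions (fun x => x) true with hps
    have hperm : ps.Perm positions := PySem.List.sorted_perm _ _ _
    have hnodup : ps.Nodup := hperm.nodup_iff.mpr (PySem.Set.nodup_ofList L)
    have hdesc : ps.Pairwise (fun a b => b < a) := by
      have h1 : ps.Pairwise (fun a b => b ≤ a) := by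
        simpa using PySem.List.sorted_pairwise_rev (xs := positions) (key := fun x => x)
      exact (h1.and hnodup).imp (fun {a b} h => lt_of_le_of_ne h.1 (Ne.symm h.2))
    have hbounds : ∀ p ∈ ps, 0 ≤ p ∧ p < N := by
      intro p hp
      have : p ∈ L := (PySem.Set.mem_ofList _ _).mp (hperm.mem_iff.mp hp)
      rw [hL] at this
      have := (List.mem_filter.mp this).2
      simp at this
      exact this
    have hmain := erase_desc_eq_filter ps lines hdesc (by simpa [hN] using hbounds)
    have hcontains : ∀ (x : Int), PySem.Set.contains positions x = ps.contains x := by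
      intro x
      have : x ∈ positions ↔ x ∈ ps := (hperm.mem_iff).symm
      by_cases hx : x ∈ ps
      · simp [PySem.Set.contains_eq_listContains, this.mpr hx, hx]
      · have hnp : x ∉ positions := fun h => hx (this.mp h)
        simp [PySem.Set.contains_eq_listContains, hnp, hx]
    have hfilters :
        ((PySem.List.enumerate lines 0).filter (fun q => !(PySem.Set.contains positions q.1)))
          = ((PySem.List.enumerate lines 0).filter (fun q => !(ps.contains q.1))) := by
      apply List.filter_congr
      intro q _
      rw [hcontains]
    simp only [hset]
    rw [hfilters, hmain]
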